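-- pv_equiv track=rewrite | github.com/baelul/15-Puzzle | weightedAStar.py | chessboardDistance
-- ===== SOURCE A (Python) =====
-- def chessboardDistance(w, curr_state, goal_state):
--     # for every element in curr_state, run through goal_state and find its position.
--     # once found - calculate moves needed to get to goal (X and Y distances), find the max,
--     # add it to the mDist sum, and then break loop
--     # this will repeat for every element in curr_state (i)
--
--     # structure
--     # curr: [[x,x,x,x],
--     #        [x,x,x,x],
--     #        [x,x,x,x],
--     #        [x,x,x,x]]
--
--     # goal: [[x,x,x,x],
--     #        [x,x,x,x],
--     #        [x,x,x,x],
--     #        [x,x,x,x]]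
--
--     mDist = 0
--
--     for curr_y in range(4):
--         for curr_x in range(4):
--             distX = 0
--             distY = 0
--
--             # zero is the empty space, there is no h(n) for this value
--             if (curr_state[curr_y][curr_x] == '0'):
--                 continue
--
--             for goal_y in range(4):
--                 for goal_x in range(4):
--                     # if goal value matches current element, compare locations
--                     if (curr_state[curr_y][curr_x] == goal_state[goal_y][goal_x]):
--                         distX = abs(curr_x - goal_x) # X distance (L or R moves needed)
--                         distY = abs(curr_y - goal_y) # Y distance (U or D moves needed)
--                         mDist += max(distX, distY)
--     return w * mDist
-- ===== SOURCE B (Python) =====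
-- def chessboardDistance(w, curr_state, goal_state):
--     # Group-by-value join: flatten both boards to cell lists, then repeatedly take the
--     # first remaining current value, add the cross-sum of Chebyshev distances for that
--     # whole value group at once, and delete the value from both lists.
--     curr_cells = [(curr_state[y][x], y, x) for y in range(4) for x in range(4)
--                   if curr_state[y][x] != '0']
--     goal_cells = [(goal_state[y][x], y, x) for y in range(4) for x in range(4)]
--     total = 0
--     C, G = curr_cells, goal_cells
--     while C:
--         v = C[0][0]
--         Cv = [(cy, cx) for (u, cy, cx) in C if u == v]
--         Gv = [(gy, gx) for (u, gy, gx) in G if u == v]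
--         total += sum(max(abs(cx - gx), abs(cy - gy)) for (cy, cx) in Cv for (gy, gx) in Gv)
--         C = [t for t in C if t[0] != v]
--         G = [t for t in G if t[0] != v]
--     return w * total
-- ===== Notes on version B (the rewrite author's own statement) =====
-- stated objective: alternative
-- what changed: B flattens both boards into (value,y,x) cell lists and computes the sum by a group-by-value join: repeatedly take the first remaining current value, add the cross-sum of Chebyshev distances for the whole value group at once, and delete that value from both lists - instead of A's per-cell scan of the entire goal board.
import Mathlib
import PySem

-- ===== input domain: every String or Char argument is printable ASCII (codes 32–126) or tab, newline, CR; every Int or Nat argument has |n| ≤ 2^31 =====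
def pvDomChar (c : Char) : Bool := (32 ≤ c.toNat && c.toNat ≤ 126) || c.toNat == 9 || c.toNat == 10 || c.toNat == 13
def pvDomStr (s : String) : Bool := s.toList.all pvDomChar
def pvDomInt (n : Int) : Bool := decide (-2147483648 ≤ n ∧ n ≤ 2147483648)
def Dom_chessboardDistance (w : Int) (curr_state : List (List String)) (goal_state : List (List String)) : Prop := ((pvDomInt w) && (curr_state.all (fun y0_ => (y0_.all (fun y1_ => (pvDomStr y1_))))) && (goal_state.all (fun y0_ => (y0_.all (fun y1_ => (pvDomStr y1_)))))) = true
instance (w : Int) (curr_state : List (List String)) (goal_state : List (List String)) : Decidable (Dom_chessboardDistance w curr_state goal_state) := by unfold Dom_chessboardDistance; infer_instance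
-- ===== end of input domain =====

-- B flattens both boards to (value,y,x) cell lists and computes the total by a
-- group-by-value join (one value group at a time) instead of A's per-cell goal scan;
-- equal return value proved on Pre_ (where A's hard-coded 4x4 indexing raises no IndexError).

-- shared indexing helper: st[y][x]; exact under Pre_ (index in range), default otherwise
def pvCell (st : List (List String)) (y x : Int) : String :=
  PySem.List.pyGetD (PySem.List.pyGetD st y []) x ""

-- ===== PORT A =====
-- the mDist accumulation loop of A: for curr_y / curr_x, skip '0', scan all of goal_state
def pvMDistA (curr_state goal_state : List (List String)) : Int :=
  (PySem.List.pyRange 0 4 1).foldl (fun m curr_y =>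
    (PySem.List.pyRange 0 4 1).foldl (fun m curr_x =>
      if pvCell curr_state curr_y curr_x == "0" then m
      else
        (PySem.List.pyRange 0 4 1).foldl (fun m goal_y =>
          (PySem.List.pyRange 0 4 1).foldl (fun m goal_x =>
            if pvCell curr_state curr_y curr_x == pvCell goal_state goal_y goal_x then
              m + max |curr_x - goal_x| |curr_y - goal_y|
            else m) m) m) m) 0

def chessboardDistance (w : Int) (curr_state : List (List String)) (goal_state : List (List String)) : Int :=
  w * pvMDistA curr_state goal_state

-- ===== PORT B =====
-- [(st[y][x], y, x) for y in range(4) for x in range(4) if st[y][x] != '0']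
def pvCurrCells (st : List (List String)) : List (String × Int × Int) :=
  (PySem.List.pyRange 0 4 1).flatMap (fun y =>
    ((PySem.List.pyRange 0 4 1).filter (fun x => !(pvCell st y x == "0"))).map
      (fun x => (pvCell st y x, y, x)))

-- [(st[y][x], y, x) for y in range(4) for x in range(4)]
def pvGoalCells (st : List (List String)) : List (String × Int × Int) :=
  (PySem.List.pyRange 0 4 1).flatMap (fun y =>
    (PySem.List.pyRange 0 4 1).map (fun x => (pvCell st y x, y, x)))

-- the 'while C:' loop of B, with 'total' as accumulator
def pvGroupJoin (total : Int) : List (String × Int × Int) → List (String × Int × Int) → Int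
  | [], _ => total
  | c :: cs, G =>
      let v := c.1
      let Cv := ((c :: cs).filter (fun t => t.1 == v)).map (fun t => (t.2.1, t.2.2))
      let Gv := (G.filter (fun t => t.1 == v)).map (fun t => (t.2.1, t.2.2))
      let s := (Cv.flatMap (fun p => Gv.map (fun q => max |p.2 - q.2| |p.1 - q.1|))).sum
      pvGroupJoin (total + s) ((c :: cs).filter (fun t => !(t.1 == v)))
        (G.filter (fun t => !(t.1 == v)))
  termination_by C _ => C.length
  decreasing_by
    simp only [List.filter_cons, beq_self_eq_true, Bool.not_true, List.length_cons]
    exact Nat.lt_succ_of_le (List.length_filter_le _ _)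

def chessboardDistance_alt (w : Int) (curr_state : List (List String)) (goal_state : List (List String)) : Int :=
  w * pvGroupJoin 0 (pvCurrCells curr_state) (pvGoalCells goal_state)

-- ===== PRECONDITION & SPEC =====
-- Pre_: exactly the inputs where A's hard-coded 4x4 indexing raises no IndexError.
def Pre_chessboardDistance (w : Int) (curr_state : List (List String)) (goal_state : List (List String)) : Prop :=
  4 ≤ curr_state.length ∧ 4 ≤ goal_state.length ∧
  (∀ r ∈ curr_state.take 4, 4 ≤ r.length) ∧ (∀ r ∈ goal_state.take 4, 4 ≤ r.length)
instance (w : Int) (curr_state : List (List String)) (goal_state : List (List String)) : Decidable (Pre_chessboardDistance w curr_state goal_state) := by unfold Pre_chessboardDistance; infer_instance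

def pvWitness_chessboardDistance : Int × List (List String) × List (List String) :=
  (2, [["1","2","3","4"],["5","6","7","8"],["9","10","11","12"],["13","14","15","0"]],
      [["1","2","3","4"],["5","6","7","8"],["9","10","11","0"],["13","14","15","12"]])

def Spec_chessboardDistance (w : Int) (curr_state : List (List String)) (goal_state : List (List String)) (out : Int) : Prop := out = chessboardDistance_alt w curr_state goal_state
instance (w : Int) (curr_state : List (List String)) (goal_state : List (List String)) (out : Int) : Decidable (Spec_chessboardDistance w curr_state goal_state out) := by unfold Spec_chessboardDistance; infer_instance

-- ===== CLAIM (what is proved, stated in full; the proofs are below) =====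
def Claim_equal_chessboardDistance : Prop := ∀ (w : Int) (curr_state : List (List String)) (goal_state : List (List String)), Dom_chessboardDistance w curr_state goal_state → Pre_chessboardDistance w curr_state goal_state → Spec_chessboardDistance w curr_state goal_state (chessboardDistance w curr_state goal_state)

-- ===== LEMMAS AND PROOFS =====

-- distance between two (y,x) positions
def pvD (p q : Int × Int) : Int := max |p.2 - q.2| |p.1 - q.1|

-- contribution of one current cell against a goal-cell list
def pvRow (c : String × Int × Int) (G : List (String × Int × Int)) : Int :=
  (G.map (fun g => if c.1 == g.1 then pvD c.2 g.2 else 0)).sum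

-- the full matching-pairs sum
def pvPair (C G : List (String × Int × Int)) : Int :=
  (C.map (fun c => pvRow c G)).sum

theorem pv_sum_flatMap {α β : Type} (l : List α) (f : α → List β) [AddCommMonoid β] :
    (l.flatMap f).sum = (l.map (fun a => (f a).sum)).sum := by
  induction l with
  | nil => rfl
  | cons a l ih => simp [List.flatMap_cons, ih]

-- split a mapped sum by a predicate
theorem pv_sum_split {α : Type} (l : List α) (p : α → Bool) (f : α → Int) :
    (l.map f).sum
      = ((l.filter p).map f).sum + ((l.filter (fun a => !p a)).map f).sum := by
  induction l with
  | nil => rfl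
  | cons a l ih =>
      by_cases h : p a = true <;>
        simp [List.filter_cons, h, ih] <;> omega

-- a filtered mapped sum as a guarded sum
theorem pv_sum_filter {α : Type} (l : List α) (p : α → Bool) (f : α → Int) :
    ((l.filter p).map f).sum = (l.map (fun a => if p a then f a else 0)).sum := by
  induction l with
  | nil => rfl
  | cons a l ih => by_cases h : p a = true <;> simp [List.filter_cons, h, ih]

-- guarded foldl accumulation as init + guarded sum
theorem pv_foldl_ite_add {α : Type} (l : List α) (p : α → Bool) (f : α → Int) (m : Int) :
    l.foldl (fun m x => if p x then m + f x else m) m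
      = m + (l.map (fun x => if p x then f x else 0)).sum := by
  induction l generalizing m with
  | nil => simp
  | cons a l ih => by_cases h : p a = true <;> simp [h, ih] <;> omega

-- a row against a value-filtered goal list, when the cell's value differs
theorem pv_row_filter_ne (c : String × Int × Int) (G : List (String × Int × Int))
    (v : String) (h : c.1 ≠ v) :
    pvRow c (G.filter (fun t => !(t.1 == v))) = pvRow c G := by
  induction G with
  | nil => rfl
  | cons g G ih =>
      simp only [pvRow, beq_iff_eq] at ih ⊢
      by_cases hg : g.1 = v
      · simp [List.filter_cons, hg, h, ih]
      · simp [List.filter_cons, hg, ih]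

-- a row equals the sum over the goal cells with matching value
theorem pv_row_eq_filter (c : String × Int × Int) (G : List (String × Int × Int)) :
    pvRow c G = ((G.filter (fun t => t.1 == c.1)).map (fun g => pvD c.2 g.2)).sum := by
  induction G with
  | nil => rfl
  | cons g G ih =>
      simp only [pvRow, beq_iff_eq] at ih ⊢
      by_cases hg : g.1 = c.1
      · simp [List.filter_cons, hg, ih]
      · have hc : c.1 ≠ g.1 := fun hh => hg hh.symm
        simp [List.filter_cons, hg, hc, ih]

-- one step of the group-by-value peel on pvPair
theorem pv_pair_step (v : String) (C G : List (String × Int × Int)) :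
    pvPair C G
      = (((C.filter (fun t => t.1 == v)).map (fun c =>
            ((G.filter (fun t => t.1 == v)).map (fun g => pvD c.2 g.2)).sum)).sum)
        + pvPair (C.filter (fun t => !(t.1 == v))) (G.filter (fun t => !(t.1 == v))) := by
  unfold pvPair
  rw [pv_sum_split C (fun t => t.1 == v) (fun c => pvRow c G)]
  congr 1
  · apply congrArg List.sum
    apply List.map_congr_left
    intro c hc
    have hv : c.1 = v := by
      have := (List.mem_filter.mp hc).2; simpa using this
    rw [pv_row_eq_filter, hv]
  · apply congrArg List.sum
    apply List.map_congr_left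
    intro c hc
    have hv : ¬ c.1 = v := by
      have := (List.mem_filter.mp hc).2; simpa using this
    exact (pv_row_filter_ne c G v hv).symm

-- B's loop computes total + pvPair
theorem pv_groupJoin_eq : ∀ (n : Nat) (C G : List (String × Int × Int)) (total : Int),
    C.length ≤ n → pvGroupJoin total C G = total + pvPair C G := by
  intro n
  induction n with
  | zero =>
      intro C G total h
      have : C = [] := List.eq_nil_of_length_eq_zero (Nat.le_zero.mp h)
      subst this
      simp [pvGroupJoin, pvPair]
  | succ n ih =>
      intro C G total h
      match C with
      | [] => simp [pvGroupJoin, pvPair]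
      | c :: cs =>
          rw [pvGroupJoin]
          have hlen : ((c :: cs).filter (fun t => !(t.1 == c.1))).length ≤ n := by
            simp only [List.filter_cons, beq_self_eq_true, Bool.not_true]
            exact Nat.le_trans (List.length_filter_le _ _) (Nat.le_of_succ_le_succ h)
          rw [ih _ _ _ hlen]
          rw [pv_pair_step c.1 (c :: cs) G]
          have hs : ((((c :: cs).filter (fun t => t.1 == c.1)).map (fun t => (t.2.1, t.2.2))).flatMap
              (fun p => ((G.filter (fun t => t.1 == c.1)).map (fun t => (t.2.1, t.2.2))).map
                (fun q => max |p.2 - q.2| |p.1 - q.1|))).sum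
              = (((c :: cs).filter (fun t => t.1 == c.1)).map (fun c' =>
                  ((G.filter (fun t => t.1 == c.1)).map (fun g => pvD c'.2 g.2)).sum)).sum := by
            rw [pv_sum_flatMap, List.map_map]
            apply congrArg List.sum
            apply List.map_congr_left
            intro t _
            simp only [List.map_map]
            rfl
          simp only [hs]
          ring

-- A's quadruple loop equals the guarded double sum
theorem pv_mDistA_eq (curr goal : List (List String)) :
    pvMDistA curr goal
      = ((PySem.List.pyRange 0 4 1).map (fun cy =>
          ((PySem.List.pyRange 0 4 1).map (fun cx =>
            if pvCell curr cy cx == "0" then 0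
            else ((PySem.List.pyRange 0 4 1).map (fun gy =>
              ((PySem.List.pyRange 0 4 1).map (fun gx =>
                if pvCell curr cy cx == pvCell goal gy gx then
                  max |cx - gx| |cy - gy| else 0)).sum)).sum)).sum)).sum := by
  unfold pvMDistA
  rw [PySem.List.foldl_congr_mem (g := fun m cy => m +
      ((PySem.List.pyRange 0 4 1).map (fun cx =>
        if pvCell curr cy cx == "0" then 0
        else ((PySem.List.pyRange 0 4 1).map (fun gy =>
          ((PySem.List.pyRange 0 4 1).map (fun gx =>
            if pvCell curr cy cx == pvCell goal gy gx then
              max |cx - gx| |cy - gy| else 0)).sum)).sum)).sum)]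
  · rw [PySem.List.foldl_add]; simp
  · intro m cy _
    rw [PySem.List.foldl_congr_mem (g := fun m cx => m +
        (if pvCell curr cy cx == "0" then 0
         else ((PySem.List.pyRange 0 4 1).map (fun gy =>
           ((PySem.List.pyRange 0 4 1).map (fun gx =>
             if pvCell curr cy cx == pvCell goal gy gx then
               max |cx - gx| |cy - gy| else 0)).sum)).sum))]
    · exact PySem.List.foldl_add _ _ _
    · intro m cx _
      by_cases h0 : (pvCell curr cy cx == "0") = true
      · simp [h0]
      · simp only [h0, Bool.false_eq_true, if_false]
        rw [PySem.List.foldl_congr_mem (g := fun m gy => m +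
            ((PySem.List.pyRange 0 4 1).map (fun gx =>
              if pvCell curr cy cx == pvCell goal gy gx then
                max |cx - gx| |cy - gy| else 0)).sum)]
        · rw [PySem.List.foldl_add]
        · intro m gy _
          exact pv_foldl_ite_add _ _ _ _

-- B's pvPair over the flattened cell lists equals the same guarded double sum
theorem pv_pair_cells_eq (curr goal : List (List String)) :
    pvPair (pvCurrCells curr) (pvGoalCells goal)
      = ((PySem.List.pyRange 0 4 1).map (fun cy =>
          ((PySem.List.pyRange 0 4 1).map (fun cx =>
            if pvCell curr cy cx == "0" then 0
            else ((PySem.List.pyRange 0 4 1).map (fun gy =>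
              ((PySem.List.pyRange 0 4 1).map (fun gx =>
                if pvCell curr cy cx == pvCell goal gy gx then
                  max |cx - gx| |cy - gy| else 0)).sum)).sum)).sum)).sum := by
  unfold pvPair pvCurrCells
  rw [List.map_flatMap, pv_sum_flatMap]
  apply congrArg List.sum
  apply List.map_congr_left
  intro cy _
  simp only [List.map_map, Function.comp_def]
  rw [pv_sum_filter]
  apply congrArg List.sum
  apply List.map_congr_left
  intro cx _
  by_cases h0 : (pvCell curr cy cx == "0") = true
  · simp [h0]
  · simp only [h0, Bool.not_false, Bool.false_eq_true, if_false, if_true]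
    unfold pvRow pvGoalCells
    rw [List.map_flatMap, pv_sum_flatMap]
    apply congrArg List.sum
    apply List.map_congr_left
    intro gy _
    simp only [List.map_map, Function.comp_def]
    rfl

-- ===== VERDICT (by name: the statement is the Claim_ definition above) =====
theorem chessboardDistance_spec : Claim_equal_chessboardDistance := by
  intro w curr goal _ _
  unfold Spec_chessboardDistance chessboardDistance chessboardDistance_alt
  rw [pv_groupJoin_eq (pvCurrCells curr).length _ _ _ (le_refl _)]
  rw [pv_mDistA_eq, pv_pair_cells_eq]
  ring
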